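-- pv_equiv track=rewrite | github.com/MrBrantCode/unitest_baseline | mut_generate/mist_train_cf/cf_17507/solution.py | create_reverse_dict
-- ===== SOURCE A (Python) =====
-- def create_reverse_dict(words):
--     """
--     Create a dictionary where keys are words containing at least two vowels
--     (case insensitive) and the values are lists of indices where the word
--     appears in the original list.
--
--     Args:
--         words (list): A list of words.
--
--     Returns:
--         dict: A dictionary with words containing at least two vowels as keys
--               and their indices as values.
--     """
--     reverse_dict = {}
--
--     for index, word in enumerate(words):
--         # Convert the word to lowercase for case insensitivity
--         lowercase_word = word.lower()
--
--         # Count the number of vowels in the word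
--         vowel_count = sum(1 for char in lowercase_word if char in 'aeiou')
--
--         # Check if the word contains at least two vowels
--         if vowel_count >= 2:
--             # Add the word and its index to the reverse lookup dictionary
--             if lowercase_word in reverse_dict:
--                 reverse_dict[lowercase_word].append(index)
--             else:
--                 reverse_dict[lowercase_word] = [index]
--
--     return reverse_dict
-- ===== SOURCE B (Python) =====
-- def create_reverse_dict(words):
--     # Staged, dict-free decomposition: lowercase once, pick the distinct
--     # qualifying keys in first-occurrence order, then find each key's
--     # indices with a per-key scan (no incrementally mutated dict).
--     lows = [w.lower() for w in words]
--     keys = [w for w in dict.fromkeys(lows)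
--             if sum(ch in 'aeiou' for ch in w) >= 2]
--     return {k: [i for i, w in enumerate(lows) if w == k] for k in keys}
-- ===== Notes on version B (the rewrite author's own statement) =====
-- stated objective: alternative
-- what changed: B replaces A's single pass that mutates a dict per occurrence with three staged passes: lowercase all words, select the distinct qualifying keys via dict.fromkeys plus a vowel filter, then compute each key's index list by a separate scan of the list per key.
import Mathlib
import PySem

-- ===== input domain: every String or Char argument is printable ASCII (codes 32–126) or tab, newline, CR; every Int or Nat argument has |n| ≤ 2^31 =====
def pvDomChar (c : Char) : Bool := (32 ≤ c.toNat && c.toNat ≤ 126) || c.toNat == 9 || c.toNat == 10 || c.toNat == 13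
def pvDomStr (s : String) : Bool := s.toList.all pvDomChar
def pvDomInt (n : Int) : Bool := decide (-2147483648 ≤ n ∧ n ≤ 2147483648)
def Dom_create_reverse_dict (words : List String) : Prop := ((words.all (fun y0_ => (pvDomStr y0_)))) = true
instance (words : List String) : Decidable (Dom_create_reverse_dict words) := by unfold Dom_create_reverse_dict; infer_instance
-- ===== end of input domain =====

-- B is a staged, dict-free decomposition (lowercase pass, distinct-key selection, per-key
-- index scan) instead of A's single pass mutating a dict per occurrence (alternative).

-- ===== PORT A =====
-- vowel count: sum(1 for char in w if char in 'aeiou') / sum(ch in 'aeiou' for ch in w)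
def pvVowelCount (cs : List Char) : Int :=
  cs.foldl (fun acc c => if "aeiou".toList.contains c then acc + 1 else acc) 0

def create_reverse_dict (words : List String) : List (String × List Int) :=
  ((PySem.List.enumerate words 0).foldl
    (fun rd p =>
      let lw := PySem.Str.lower p.2
      let vc := pvVowelCount lw.toList
      if 2 ≤ vc then
        if rd.contains lw then rd.modify lw [] (fun l => l ++ [p.1])
        else rd.insert lw [p.1]
      else rd)
    PySem.Dict.empty).items

-- ===== PORT B =====
def create_reverse_dict_alt (words : List String) : List (String × List Int) :=
  let lows := words.map PySem.Str.lower
  let keys := (PySem.List.dedup lows).filter (fun w => decide (2 ≤ pvVowelCount w.toList))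
  keys.map (fun k =>
    (k, ((PySem.List.enumerate lows 0).filter (fun p => p.2 == k)).map (fun p => p.1)))

-- ===== PRECONDITION & SPEC =====
def Spec_create_reverse_dict (words : List String) (out : List (String × List Int)) : Prop := out = create_reverse_dict_alt words
instance (words : List String) (out : List (String × List Int)) : Decidable (Spec_create_reverse_dict words out) := by unfold Spec_create_reverse_dict; infer_instance

-- ===== CLAIM (what is proved, stated in full; the proofs are below) =====
def Claim_equal_create_reverse_dict : Prop := ∀ (words : List String), Dom_create_reverse_dict words → Spec_create_reverse_dict words (create_reverse_dict words)

-- ===== LEMMAS AND PROOFS =====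

-- the vowel filter, the step of A's loop on an already-lowered word, the per-key index
-- list and the whole table B builds, all over the lowered list ls
def pvQ (w : String) : Bool := decide (2 ≤ pvVowelCount w.toList)

def pvStep (rd : PySem.Dict String (List Int)) (p : Int × String) : PySem.Dict String (List Int) :=
  if 2 ≤ pvVowelCount p.2.toList then
    if rd.contains p.2 then rd.modify p.2 [] (fun l => l ++ [p.1])
    else rd.insert p.2 [p.1]
  else rd

def pvIdxs (k : String) (ls : List String) : List Int :=
  ((PySem.List.enumerate ls 0).filter (fun p => p.2 == k)).map (fun p => p.1)

def pvTbl (ls : List String) : List (String × List Int) :=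
  ((PySem.List.dedup ls).filter pvQ).map (fun k => (k, pvIdxs k ls))

theorem pv_enumerate_map {α β : Type} (f : α → β) (xs : List α) (s : Int) :
    PySem.List.enumerate (xs.map f) s
      = (PySem.List.enumerate xs s).map (fun p => (p.1, f p.2)) := by
  induction xs generalizing s with
  | nil => rfl
  | cons x t ih => simp [PySem.List.enumerate_cons, ih]

theorem pv_idxs_append (k w : String) (ls : List String) :
    pvIdxs k (ls ++ [w])
      = pvIdxs k ls ++ (if w = k then [(ls.length : Int)] else []) := by
  unfold pvIdxs
  rw [PySem.List.enumerate_append]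
  simp [PySem.List.enumerate_cons]
  by_cases h : w = k <;> simp [h]

theorem pv_idxs_of_not_mem (k : String) (ls : List String) (h : k ∉ ls) :
    pvIdxs k ls = [] := by
  unfold pvIdxs
  rw [List.filter_eq_nil_iff.mpr, List.map_nil]
  intro p hp
  have : p.2 ∈ ls := by
    have := List.mem_map_of_mem (f := fun p : Int × String => p.2) hp
    rwa [PySem.List.map_snd_enumerate] at this
  simp only [beq_iff_eq]
  intro he; exact h (he ▸ this)

theorem pv_keys_tbl (ls : List String) :
    (pvTbl ls).map (fun p => p.1) = (PySem.List.dedup ls).filter pvQ := by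
  unfold pvTbl
  rw [List.map_map]
  exact List.map_id _

theorem pv_mem_keys (ls : List String) (w : String) :
    w ∈ (PySem.List.dedup ls).filter pvQ ↔ w ∈ ls ∧ pvQ w = true := by
  rw [List.mem_filter, PySem.List.mem_dedup]

theorem pv_nodup_keys (ls : List String) : ((PySem.List.dedup ls).filter pvQ).Nodup :=
  (PySem.List.nodup_dedup ls).filter _

theorem pv_contains_of_items (d : PySem.Dict String (List Int)) (ls : List String) (w : String)
    (h : d.items = pvTbl ls) :
    d.contains w = decide (w ∈ ls ∧ pvQ w = true) := by
  simp only [PySem.Dict.contains, h, pvTbl, List.any_map]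
  rw [Bool.eq_iff_iff]
  simp only [List.any_eq_true, Function.comp, beq_iff_eq, decide_eq_true_eq,
    List.mem_filter, PySem.List.mem_dedup]
  constructor
  · rintro ⟨k, ⟨hk, hq⟩, rfl⟩; exact ⟨hk, hq⟩
  · rintro ⟨h1, h2⟩; exact ⟨w, ⟨h1, h2⟩, rfl⟩

theorem pv_getD_of_items (d : PySem.Dict String (List Int)) (ls : List String) (w : String)
    (h : d.items = pvTbl ls) (hw : w ∈ ls) (hq : pvQ w = true) :
    d.getD w [] = pvIdxs w ls := by
  have hmem : (w, pvIdxs w ls) ∈ d.items := by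
    rw [h]; exact List.mem_map_of_mem ((pv_mem_keys ls w).mpr ⟨hw, hq⟩)
  have hnd : d.keys.Nodup := by
    show (d.items.map _).Nodup
    rw [h, pv_keys_tbl]; exact pv_nodup_keys ls
  exact PySem.Dict.getD_of_mem_items d hmem hnd []

-- the invariant: A's loop over the lowered list builds exactly B's table
theorem pv_main (ls : List String) :
    ((PySem.List.enumerate ls 0).foldl pvStep PySem.Dict.empty).items = pvTbl ls := by
  induction ls using List.reverseRecOn with
  | nil => rfl
  | append_singleton ls w ih =>
    rw [PySem.List.enumerate_append, List.foldl_append]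
    simp only [PySem.List.enumerate_cons, PySem.List.enumerate_nil, List.foldl_cons, List.foldl_nil]
    set F := (PySem.List.enumerate ls 0).foldl pvStep PySem.Dict.empty with hF
    have hkeys : pvTbl (ls ++ [w])
        = ((PySem.Set.add (PySem.List.dedup ls) w).filter pvQ).map
            (fun k => (k, pvIdxs k (ls ++ [w]))) := by
      unfold pvTbl
      rw [show PySem.List.dedup (ls ++ [w]) = PySem.Set.add (PySem.List.dedup ls) w by
        simp only [PySem.List.dedup_eq_ofList]; exact PySem.Set.ofList_append_singleton ls w]
    by_cases hq : pvQ w = true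
    · have hq' : 2 ≤ pvVowelCount w.toList := of_decide_eq_true hq
      by_cases hm : w ∈ ls
      · -- repeated qualifying word: A modifies the existing entry, B's table extends it
        have hc : F.contains w = true := by
          rw [pv_contains_of_items F ls w ih]; simp [hm, hq]
        have hg : F.getD w [] = pvIdxs w ls := pv_getD_of_items F ls w ih hm hq
        simp only [pvStep, hq', if_true, hc, if_true, PySem.Dict.modify]
        rw [PySem.Dict.items_insert_of_contains F _ hc, hg, ih, hkeys,
          PySem.Set.add_of_mem (by rwa [PySem.List.mem_dedup])]
        unfold pvTbl
        rw [List.map_map]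
        apply List.map_congr_left
        intro k hk
        have hkls : k ∈ ls := ((pv_mem_keys ls k).mp hk).1
        rw [pv_idxs_append]
        by_cases he : w = k
        · subst he; simp [zero_add]
        · simp [Function.comp, Ne.symm he, he]
      · -- fresh qualifying word: A appends a new entry, B's table gains key w with index [len ls]
        have hc : F.contains w = false := by
          rw [pv_contains_of_items F ls w ih]; simp [hm]
        simp only [pvStep, hq', if_true, hc, Bool.false_eq_true, if_false]
        rw [PySem.Dict.items_insert_of_not_contains F _ hc, ih, hkeys,
          PySem.Set.add_of_not_mem (by rwa [PySem.List.mem_dedup]),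
          List.filter_append, List.filter_cons, hq]
        simp only [List.filter_nil, List.map_append]
        congr 1
        · unfold pvTbl
          apply List.map_congr_left
          intro k hk
          have hkls : k ∈ ls := ((pv_mem_keys ls k).mp hk).1
          have hne : w ≠ k := fun he => hm (he ▸ hkls)
          rw [pv_idxs_append]; simp [hne]
        · have hwid : pvIdxs w (ls ++ [w]) = [(ls.length : Int)] := by
            rw [pv_idxs_append, pv_idxs_of_not_mem w ls hm]; simp
          simp [hwid]
    · -- non-qualifying word: A's loop skips it and it is filtered out of B's table
      have hq' : ¬ 2 ≤ pvVowelCount w.toList := fun h => hq (decide_eq_true h)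
      simp only [pvStep, hq', if_false]
      rw [ih, hkeys]
      have hfil : (PySem.Set.add (PySem.List.dedup ls) w).filter pvQ
          = (PySem.List.dedup ls).filter pvQ := by
        rw [PySem.Set.add_eq_ite]
        split
        · rfl
        · rw [List.filter_append, List.filter_cons]
          simp [hq]
      rw [hfil]
      unfold pvTbl
      apply List.map_congr_left
      intro k hk
      have hkq : pvQ k = true := ((pv_mem_keys ls k).mp hk).2
      have hne : w ≠ k := fun he => hq (he ▸ hkq)
      rw [pv_idxs_append]; simp [hne]

-- ===== VERDICT (by name: the statement is the Claim_ definition above) =====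
theorem create_reverse_dict_spec : Claim_equal_create_reverse_dict := by
  intro words _
  unfold Spec_create_reverse_dict create_reverse_dict create_reverse_dict_alt
  have h : PySem.List.enumerate (words.map PySem.Str.lower) 0
      = (PySem.List.enumerate words 0).map (fun p => (p.1, PySem.Str.lower p.2)) :=
    pv_enumerate_map _ _ _
  calc ((PySem.List.enumerate words 0).foldl
          (fun rd p =>
            let lw := PySem.Str.lower p.2
            let vc := pvVowelCount lw.toList
            if 2 ≤ vc then
              if rd.contains lw then rd.modify lw [] (fun l => l ++ [p.1])
              else rd.insert lw [p.1]
            else rd)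
          PySem.Dict.empty).items
      = ((PySem.List.enumerate (words.map PySem.Str.lower) 0).foldl pvStep
          PySem.Dict.empty).items := by
        rw [h, List.foldl_map]
        rfl
    _ = pvTbl (words.map PySem.Str.lower) := pv_main _
    _ = _ := rfl
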